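-- pv_equiv track=rewrite | github.com/ddururiiiiiii/programmers-python | programmers/level2/241129 할인행사.py | solution
-- ===== SOURCE A (Python) =====
-- from collections import Counter
--
-- def solution(want, number, discount):
--     answer = 0
--
--     arr = {}
--     for x, y in zip(want, number):
--         arr[x] = y
--
--     for i in range(len(discount)-9):
--         c = Counter(discount[i:i+10])
--         if c == arr :
--             answer += 1
--     return answer
-- ===== SOURCE B (Python) =====
-- def solution(want, number, discount):
--     # Sliding-window re-implementation: build the requirement dict once; reject
--     # early unless the required counts are positive and sum to 10 (a 10-day
--     # Counter can never equal the dict otherwise); then slide a 10-day window,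
--     # updating only the counts of wanted items, and tally windows where every
--     # wanted item hits exactly its required count (no extras are possible,
--     # since the required counts already fill the whole window).
--     req = {}
--     for x, y in zip(want, number):
--         req[x] = y
--     n = len(discount)
--     vals = list(req.values())
--     if n < 10 or sum(vals) != 10 or any(v <= 0 for v in vals):
--         return 0
--     cnt = {k: 0 for k in req}
--     for d in discount[:10]:
--         if d in cnt:
--             cnt[d] += 1
--     answer = 1 if all(cnt[k] == req[k] for k in req) else 0
--     for i in range(10, n):
--         out = discount[i - 10]
--         if out in cnt:
--             cnt[out] -= 1
--         new = discount[i]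
--         if new in cnt:
--             cnt[new] += 1
--         if all(cnt[k] == req[k] for k in req):
--             answer += 1
--     return answer
-- ===== Notes on version B (the rewrite author's own statement) =====
-- stated objective: faster
-- what changed: Instead of building a fresh Counter of each 10-day slice and comparing it to the dict, B rejects impossible requirement dicts once (required counts must be positive and sum to 10) and then slides a 10-day window, updating only the wanted items' counts incrementally and checking them against the requirements.
import Mathlib
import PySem

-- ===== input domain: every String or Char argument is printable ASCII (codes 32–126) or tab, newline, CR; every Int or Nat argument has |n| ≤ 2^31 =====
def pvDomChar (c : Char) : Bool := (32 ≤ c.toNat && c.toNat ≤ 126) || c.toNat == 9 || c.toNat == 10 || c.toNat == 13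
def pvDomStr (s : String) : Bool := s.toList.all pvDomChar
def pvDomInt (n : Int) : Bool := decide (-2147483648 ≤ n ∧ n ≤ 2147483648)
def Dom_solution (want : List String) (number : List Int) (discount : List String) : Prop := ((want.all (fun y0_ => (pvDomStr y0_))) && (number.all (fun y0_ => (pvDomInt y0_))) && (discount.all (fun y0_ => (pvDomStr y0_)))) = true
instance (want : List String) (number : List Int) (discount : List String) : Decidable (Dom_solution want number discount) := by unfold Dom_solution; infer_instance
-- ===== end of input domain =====

-- B replaces A's per-window Counter construction and dict comparison by an early rejection of
-- impossible requirement dicts plus an incrementally maintained sliding-window count (measured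
-- faster in a timing run; equivalence of the return values is proved below).

-- ===== PORT A =====
-- Python's 'Counter(discount[i:i+10]) == arr' compares dicts ignoring order:
-- same key set, and the same value at every key.
def pyDictEq (d1 d2 : PySem.Dict String Int) : Bool :=
  PySem.Set.equal d1.keys d2.keys && d1.keys.all (fun k => d1.get? k == d2.get? k)

def solution (want : List String) (number : List Int) (discount : List String) : Int :=
  -- arr = {}; for x, y in zip(want, number): arr[x] = y
  let arr := (want.zip number).foldl (fun d xy => d.insert xy.1 xy.2) PySem.Dict.empty
  -- for i in range(len(discount)-9): c = Counter(discount[i:i+10]); if c == arr: answer += 1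
  (PySem.List.pyRange 0 ((discount.length : Int) - 9) 1).foldl
    (fun answer i =>
      let c := PySem.Dict.counter (PySem.List.slice discount (some i) (some (i + 10)))
      if pyDictEq c arr then answer + 1 else answer) 0

-- ===== PORT B =====
def solution_alt (want : List String) (number : List Int) (discount : List String) : Int :=
  -- req = {}; for x, y in zip(want, number): req[x] = y
  let req := (want.zip number).foldl (fun d xy => d.insert xy.1 xy.2) PySem.Dict.empty
  let n : Int := discount.length
  let vals := req.values
  if n < 10 ∨ vals.sum ≠ 10 ∨ vals.any (fun v => decide (v ≤ 0)) = true then 0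
  else
    -- cnt = {k: 0 for k in req}
    let cnt0 := req.keys.foldl (fun d k => d.insert k 0) (PySem.Dict.empty : PySem.Dict String Int)
    -- for d in discount[:10]: if d in cnt: cnt[d] += 1
    let cnt1 := (PySem.List.slice discount none (some 10)).foldl
      (fun c d => if c.contains d then c.insert d (c.getD d 0 + 1) else c) cnt0
    -- answer = 1 if all(cnt[k] == req[k] for k in req) else 0   (keys are present: getD is exact)
    let answer0 : Int := if req.keys.all (fun k => cnt1.getD k 0 == req.getD k 0) then 1 else 0
    -- for i in range(10, n): slide the window and re-check
    let res := (PySem.List.pyRange 10 n 1).foldl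
      (fun (s : PySem.Dict String Int × Int) i =>
        let out := PySem.List.pyGetD discount (i - 10) ""
        let c1 := if s.1.contains out then s.1.insert out (s.1.getD out 0 - 1) else s.1
        let nw := PySem.List.pyGetD discount i ""
        let c2 := if c1.contains nw then c1.insert nw (c1.getD nw 0 + 1) else c1
        (c2, if req.keys.all (fun k => c2.getD k 0 == req.getD k 0) then s.2 + 1 else s.2))
      (cnt1, answer0)
    res.2

-- ===== PRECONDITION & SPEC =====
def Spec_solution (want : List String) (number : List Int) (discount : List String) (out : Int) : Prop := out = solution_alt want number discount
instance (want : List String) (number : List Int) (discount : List String) (out : Int) : Decidable (Spec_solution want number discount out) := by unfold Spec_solution; infer_instance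

-- ===== CLAIM (what is proved, stated in full; the proofs are below) =====
def Claim_equal_solution : Prop := ∀ (want : List String) (number : List Int) (discount : List String), Dom_solution want number discount → Spec_solution want number discount (solution want number discount)

-- ===== LEMMAS AND PROOFS =====

-- the requirement dict both programs build
def reqOf (want : List String) (number : List Int) : PySem.Dict String Int :=
  (want.zip number).foldl (fun d xy => d.insert xy.1 xy.2) PySem.Dict.empty

-- count of k in the 10-day window starting at t
def wcount (discount : List String) (t : Nat) (k : String) : Nat :=
  ((discount.drop t).take 10).count k

-- the abstract per-window match: every required key has exactly its required count
def matchN (discount : List String) (arr : PySem.Dict String Int) (t : Nat) : Bool :=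
  arr.keys.all (fun k => ((wcount discount t k : Int) == arr.getD k 0))

theorem reqOf_keys_nodup (want : List String) (number : List Int) : (reqOf want number).keys.Nodup :=
  PySem.Dict.nodup_keys_foldl_insert_key (want.zip number) (fun xy => xy.1) (fun _ xy => xy.2)
    (PySem.Dict.empty : PySem.Dict String Int) (by simp)

theorem pyRange_zero_nonpos (b : Int) (h : b ≤ 0) : PySem.List.pyRange 0 b 1 = [] := by
  rw [List.eq_nil_iff_forall_not_mem]
  intro x hx
  have := PySem.List.mem_pyRange_one.mp hx
  omega

theorem pyRange_ten (m : Nat) :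
    PySem.List.pyRange 10 ((10 + m : Nat) : Int) 1 = (List.range m).map (fun j => ((10 + j : Nat) : Int)) := by
  induction m with
  | zero => simp
  | succ m ih =>
    have hcast : ((10 + (m+1) : Nat) : Int) = ((10 + m : Nat) : Int) + 1 := by push_cast; ring
    rw [hcast, PySem.List.pyRange_one_succ_right (by push_cast; omega), ih, List.range_succ]
    simp

theorem cnt0_getD (K : List String) (k : String) :
    (K.foldl (fun d k => d.insert k 0) (PySem.Dict.empty : PySem.Dict String Int)).getD k 0 = 0 := by
  suffices h : ∀ (d : PySem.Dict String Int), (∀ x, d.getD x 0 = 0) →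
      ∀ k, (K.foldl (fun d k => d.insert k 0) d).getD k 0 = 0 by
    exact h _ (by simp [PySem.Dict.getD_empty]) k
  induction K with
  | nil => intro d hd k; exact hd k
  | cons y ys ih =>
    intro d hd k
    simp only [List.foldl_cons]
    exact ih _ (by intro x; rw [PySem.Dict.getD_insert]; split <;> simp [hd]) k

theorem cnt0_contains (K : List String) (x : String) :
    (K.foldl (fun d k => d.insert k 0) (PySem.Dict.empty : PySem.Dict String Int)).contains x
      = decide (x ∈ K) := by
  have hkeys : (K.foldl (fun d k => d.insert k 0) (PySem.Dict.empty : PySem.Dict String Int)).keys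
      = PySem.Set.update (PySem.Dict.empty : PySem.Dict String Int).keys K :=
    PySem.Dict.keys_foldl_insert K (fun _ _ => 0) _
  rw [Bool.eq_iff_iff]
  simp [PySem.Dict.contains_iff_mem_keys, hkeys, PySem.Set.mem_update]

theorem fill_invariant (K : List String) (w : List String) (c : PySem.Dict String Int)
    (hc : ∀ x, c.contains x = decide (x ∈ K)) :
    (∀ x, (w.foldl (fun c d => if c.contains d then c.insert d (c.getD d 0 + 1) else c) c).contains x = decide (x ∈ K)) ∧
    (∀ k ∈ K, (w.foldl (fun c d => if c.contains d then c.insert d (c.getD d 0 + 1) else c) c).getD k 0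
        = c.getD k 0 + (w.count k : Int)) := by
  induction w generalizing c with
  | nil => exact ⟨hc, by simp⟩
  | cons d ds ih =>
    simp only [List.foldl_cons]
    set c' := if c.contains d then c.insert d (c.getD d 0 + 1) else c with hc'
    have hcon : ∀ x, c'.contains x = decide (x ∈ K) := by
      intro x
      rw [hc']
      split
      · rename_i hd
        rw [PySem.Dict.contains_insert]
        by_cases hxd : x = d
        · subst hxd
          have hx : decide (x ∈ K) = true := by rw [← hc x]; exact hd
          simp [hx]
        · simp [hxd, hc x]
      · exact hc x
    obtain ⟨h1, h2⟩ := ih c' hcon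
    refine ⟨h1, ?_⟩
    intro k hk
    rw [h2 k hk, hc']
    by_cases hkd : k = d
    · subst hkd
      have hcc : c.contains k = true := by rw [hc k]; simp [hk]
      simp only [hcc, if_true, PySem.Dict.getD_insert]
      simp
      ring
    · split
      · rw [PySem.Dict.getD_insert]
        simp [hkd, Ne.symm hkd]
      · simp [Ne.symm hkd]

theorem dictEq_counter_iff (w : List String) (arr : PySem.Dict String Int) (hnd : arr.keys.Nodup) :
    pyDictEq (PySem.Dict.counter w) arr = true ↔
      ((∀ x, x ∈ w ↔ x ∈ arr.keys) ∧ ∀ k ∈ arr.keys, ((w.count k : Int) = arr.getD k 0)) := by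
  unfold pyDictEq
  rw [Bool.and_eq_true, PySem.Set.equal_iff, PySem.Dict.keys_counter, List.all_eq_true]
  constructor
  · rintro ⟨hmem, hvals⟩
    have hmem' : ∀ x, x ∈ w ↔ x ∈ arr.keys := by
      intro x; rw [← hmem x, PySem.Set.mem_ofList]
    refine ⟨hmem', ?_⟩
    intro k hk
    have hkw : k ∈ PySem.Set.ofList w := by rw [PySem.Set.mem_ofList, hmem' k]; exact hk
    have hkw2 := hkw
    have h1 : (PySem.Dict.counter w).get? k = some ((w.count k : Int)) :=
      PySem.Dict.get?_of_mem_items _ (by rw [PySem.Dict.items_counter]; exact List.mem_map_of_mem hkw)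
        (PySem.Dict.nodup_keys_counter w)
    have h2 : arr.get? k = some (arr.getD k 0) :=
      PySem.Dict.get?_of_mem_items _ (by rw [PySem.Dict.items_eq_map_keys arr hnd 0]; exact List.mem_map_of_mem hk) hnd
    have := hvals k hkw
    rw [h1, h2] at this
    simpa using this
  · rintro ⟨hmem, hvals⟩
    constructor
    · intro x; rw [PySem.Set.mem_ofList]; exact hmem x
    · intro k hk
      rw [PySem.Set.mem_ofList] at hk
      have hkK : k ∈ arr.keys := (hmem k).mp hk
      have h1 : (PySem.Dict.counter w).get? k = some ((w.count k : Int)) :=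
        PySem.Dict.get?_of_mem_items _ (by rw [PySem.Dict.items_counter]; exact List.mem_map_of_mem (by rw [PySem.Set.mem_ofList]; exact hk))
          (PySem.Dict.nodup_keys_counter w)
      have h2 : arr.get? k = some (arr.getD k 0) :=
        PySem.Dict.get?_of_mem_items _ (by rw [PySem.Dict.items_eq_map_keys arr hnd 0]; exact List.mem_map_of_mem hkK) hnd
      rw [h1, h2, hvals k hkK]
      simp

-- nodup subset gives bounded count sum

theorem count_sum_le (L w : List String) (hnd : L.Nodup) (hsub : ∀ x ∈ L, x ∈ w) :
    (L.map (fun k => w.count k)).sum ≤ w.length := by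
  have hsp : List.Subperm L w.dedup :=
    hnd.subperm (by intro x hx; rw [List.mem_dedup]; exact hsub x hx)
  obtain ⟨l, hp, hs⟩ := hsp
  calc (L.map (fun k => w.count k)).sum = (l.map (fun k => w.count k)).sum := ((hp.map _).sum_eq).symm
    _ ≤ (w.dedup.map (fun k => w.count k)).sum := (hs.map _).sum_le_sum (by omega)
    _ = w.length := List.sum_map_count_dedup_eq_length w

theorem perm_dedup_of_mem_iff (L w : List String) (hnd : L.Nodup) (h : ∀ x, x ∈ w ↔ x ∈ L) :
    L.Perm w.dedup := by
  rw [List.perm_ext_iff_of_nodup hnd (List.nodup_dedup w)]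
  intro x; rw [List.mem_dedup]; exact (h x).symm

theorem dictEq_gate (w : List String) (arr : PySem.Dict String Int) (hnd : arr.keys.Nodup)
    (hlen : w.length = 10) (h : pyDictEq (PySem.Dict.counter w) arr = true) :
    (arr.keys.map (fun k => arr.getD k 0)).sum = 10 ∧ ∀ k ∈ arr.keys, 0 < arr.getD k 0 := by
  obtain ⟨hmem, hvals⟩ := (dictEq_counter_iff w arr hnd).mp h
  constructor
  · have e1 : (arr.keys.map (fun k => arr.getD k 0)).sum = (arr.keys.map (fun k => ((w.count k : Nat) : Int))).sum := by
      apply congrArg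
      apply List.map_congr_left
      intro k hk; exact (hvals k hk).symm
    rw [e1]
    have e2 : (arr.keys.map (fun k => ((w.count k : Nat) : Int))).sum = ((arr.keys.map (fun k => w.count k)).sum : Int) := by
      rw [Nat.cast_list_sum, List.map_map]; rfl
    rw [e2]
    have hperm := perm_dedup_of_mem_iff arr.keys w hnd hmem
    have : (arr.keys.map (fun k => w.count k)).sum = (w.dedup.map (fun k => w.count k)).sum := (hperm.map _).sum_eq
    rw [this, List.sum_map_count_dedup_eq_length w, hlen]
    rfl
  · intro k hk
    rw [← hvals k hk]
    have : 0 < w.count k := List.count_pos_iff.mpr ((hmem k).mpr hk)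
    omega

theorem dictEq_char (w : List String) (arr : PySem.Dict String Int) (hnd : arr.keys.Nodup)
    (hlen : w.length = 10)
    (hsum : (arr.keys.map (fun k => arr.getD k 0)).sum = 10)
    (hpos : ∀ k ∈ arr.keys, 0 < arr.getD k 0) :
    pyDictEq (PySem.Dict.counter w) arr = arr.keys.all (fun k => ((w.count k : Int) == arr.getD k 0)) := by
  rw [Bool.eq_iff_iff, dictEq_counter_iff w arr hnd, List.all_eq_true]
  constructor
  · rintro ⟨_, hvals⟩ k hk
    simpa using hvals k hk
  · intro hall
    have hvals : ∀ k ∈ arr.keys, ((w.count k : Int) = arr.getD k 0) := by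
      intro k hk; simpa using hall k hk
    have hKw : ∀ k ∈ arr.keys, k ∈ w := by
      intro k hk
      have := hpos k hk
      rw [← hvals k hk] at this
      exact List.count_pos_iff.mp (by omega)
    refine ⟨fun x => ⟨fun hxw => ?_, fun hxK => hKw x hxK⟩, hvals⟩
    by_contra hxK
    -- x ∈ w but not required: counts over keys ++ [x] exceed the window
    have hsum10 : (arr.keys.map (fun k => w.count k)).sum = 10 := by
      have e1 : (arr.keys.map (fun k => ((w.count k : Nat) : Int))).sum = 10 := by
        rw [List.map_congr_left (fun k hk => hvals k hk)]; exact hsum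
      have e2 : (arr.keys.map (fun k => ((w.count k : Nat) : Int))).sum = ((arr.keys.map (fun k => w.count k)).sum : Int) := by
        rw [Nat.cast_list_sum, List.map_map]; rfl
      rw [e2] at e1
      exact_mod_cast e1
    have hbig := count_sum_le (arr.keys ++ [x]) w (by simp [List.nodup_append, hnd]; intro a ha hax; exact hxK (hax ▸ ha)) ?_
    · rw [List.map_append, List.sum_append] at hbig
      simp only [List.map_cons, List.map_nil, List.sum_cons, List.sum_nil] at hbig
      have hx : 0 < w.count x := List.count_pos_iff.mpr hxw
      rw [hsum10, hlen] at hbig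
      omega
    · intro y hy
      rcases List.mem_append.mp hy with h1 | h1
      · exact hKw y h1
      · simp at h1; subst h1; exact hxw

theorem A_eq (want : List String) (number : List Int) (discount : List String) :
    solution want number discount =
      ((List.range (discount.length - 9)).countP
        (fun t => pyDictEq (PySem.Dict.counter ((discount.drop t).take 10)) (reqOf want number)) : Int) := by
  have hslice : ∀ t : Nat, PySem.List.slice discount (some (t:Int)) (some ((t:Int)+10)) = (discount.drop t).take 10 := by
    intro t
    have h10 : ((t:Int) + 10) = ((t:Int) + ((10:Nat):Int)) := by norm_num
    rw [h10, PySem.List.slice_natCast_add]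
  show (PySem.List.pyRange 0 ((discount.length : Int) - 9) 1).foldl
      (fun answer i =>
        if pyDictEq (PySem.Dict.counter (PySem.List.slice discount (some i) (some (i + 10)))) (reqOf want number)
        then answer + 1 else answer) 0 = _
  by_cases hlen : 9 ≤ discount.length
  · have h9 : ((discount.length : Int) - 9) = ((discount.length - 9 : Nat) : Int) := by
      omega
    rw [h9, PySem.List.pyRange_zero_natCast, List.foldl_map]
    have hfun : ∀ (a : Int) (t : Nat), t ∈ List.range (discount.length - 9) →
        (if pyDictEq (PySem.Dict.counter (PySem.List.slice discount (some ((t:Nat):Int)) (some (((t:Nat):Int) + 10)))) (reqOf want number)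
         then a + 1 else a)
        = (if (fun t : Nat => pyDictEq (PySem.Dict.counter ((discount.drop t).take 10)) (reqOf want number)) t
           then a + 1 else a) := by
      intro a t _
      rw [hslice t]
    rw [PySem.List.foldl_congr_mem _ _ _ _ hfun,
        PySem.List.foldl_if_add_one (fun t : Nat => pyDictEq (PySem.Dict.counter ((discount.drop t).take 10)) (reqOf want number))]
    omega
  · have h1 : PySem.List.pyRange 0 ((discount.length : Int) - 9) 1 = [] := by
      apply pyRange_zero_nonpos; omega
    have h2 : discount.length - 9 = 0 := by omega
    rw [h1, h2]
    simp

theorem all_congr_mem {α : Type} (l : List α) (f g : α → Bool) (h : ∀ x ∈ l, f x = g x) :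
    l.all f = l.all g := by
  induction l with
  | nil => rfl
  | cons x xs ih =>
    simp only [List.all_cons]
    rw [h x (by simp), ih (fun y hy => h y (by simp [hy]))]

theorem bump_contains (K : List String) (c : PySem.Dict String Int)
    (hc : ∀ x, c.contains x = decide (x ∈ K)) (d : String) (w : Int) (x : String) :
    (if c.contains d then c.insert d w else c).contains x = decide (x ∈ K) := by
  split
  · rename_i hd
    rw [PySem.Dict.contains_insert]
    by_cases hxd : x = d
    · subst hxd
      have hx : decide (x ∈ K) = true := by rw [← hc x]; exact hd
      simp [hx]
    · simp [hxd, hc x]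
  · exact hc x

theorem bump_getD (K : List String) (c : PySem.Dict String Int)
    (hc : ∀ x, c.contains x = decide (x ∈ K)) (d : String) (δ : Int) (k : String) (hk : k ∈ K) :
    (if c.contains d then c.insert d (c.getD d 0 + δ) else c).getD k 0
      = c.getD k 0 + (if d = k then δ else 0) := by
  split
  · rename_i hd
    rw [PySem.Dict.getD_insert]
    by_cases hkd : k = d
    · subst hkd; simp
    · rw [if_neg hkd, if_neg (fun h : d = k => hkd h.symm), add_zero]
  · rename_i hd
    have : d ∉ K := by
      intro hmem
      rw [hc d] at hd; simp [hmem] at hd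
    have hdk : d ≠ k := fun h => this (h ▸ hk)
    simp [hdk]

theorem wcount_succ (discount : List String) (t : Nat) (h : t + 11 ≤ discount.length) (k : String) :
    ((wcount discount (t+1) k : Int)) =
      (wcount discount t k : Int)
        - (if discount[t]'(by omega) = k then 1 else 0) + (if discount[t+10]'(by omega) = k then 1 else 0) := by
  unfold wcount
  have h2 : (discount.drop (t+1)).take 10 = (discount.drop (t+1)).take 9 ++ ((discount.drop (t+1))[9]?).toList :=
    List.take_add_one
  have h3 : (discount.drop (t+1))[9]? = some (discount[t+10]'(by omega)) := by
    rw [List.getElem?_drop]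
    exact List.getElem?_eq_getElem (by omega)
  have h4 : (discount.drop t).take 10 = discount[t]'(by omega) :: (discount.drop (t+1)).take 9 := by
    rw [List.drop_eq_getElem_cons (show t < discount.length by omega)]; rfl
  rw [h2, h3, h4]
  simp [List.count_cons, List.count_append]

theorem loop_invariant (discount : List String) (arr : PySem.Dict String Int)
    (m t0 : Nat) (c : PySem.Dict String Int) (a : Int)
    (hle : t0 + 10 + m ≤ discount.length)
    (hc : ∀ x, c.contains x = decide (x ∈ arr.keys))
    (hcnt : ∀ k ∈ arr.keys, c.getD k 0 = (wcount discount t0 k : Int)) :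
    ((((List.range m).map (fun j => ((t0 + 10 + j : Nat) : Int))).foldl
      (fun (s : PySem.Dict String Int × Int) i =>
        let out := PySem.List.pyGetD discount (i - 10) ""
        let c1 := if s.1.contains out then s.1.insert out (s.1.getD out 0 - 1) else s.1
        let nw := PySem.List.pyGetD discount i ""
        let c2 := if c1.contains nw then c1.insert nw (c1.getD nw 0 + 1) else c1
        (c2, if arr.keys.all (fun k => c2.getD k 0 == arr.getD k 0) then s.2 + 1 else s.2))
      (c, a)).2)
      = a + ((List.range m).countP (fun j => matchN discount arr (t0 + 1 + j)) : Int) := by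
  induction m generalizing t0 c a with
  | zero => simp
  | succ m ih =>
    have ht0 : t0 < discount.length := by omega
    have ht10 : t0 + 10 < discount.length := by omega
    set f := (fun (s : PySem.Dict String Int × Int) i =>
        let out := PySem.List.pyGetD discount (i - 10) ""
        let c1 := if s.1.contains out then s.1.insert out (s.1.getD out 0 - 1) else s.1
        let nw := PySem.List.pyGetD discount i ""
        let c2 := if c1.contains nw then c1.insert nw (c1.getD nw 0 + 1) else c1
        (c2, if arr.keys.all (fun k => c2.getD k 0 == arr.getD k 0) then s.2 + 1 else s.2)) with hf
    rw [List.range_succ_eq_map, List.map_cons, List.foldl_cons, List.map_map]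
    have hout : PySem.List.pyGetD discount (((t0 + 10 + 0 : Nat) : Int) - 10) "" = discount[t0] := by
      have e : (((t0 + 10 + 0 : Nat) : Int) - 10) = ((t0 : Nat) : Int) := by push_cast; ring
      rw [e, PySem.List.pyGetD_natCast]
      simp [List.getD_eq_getElem?_getD, List.getElem?_eq_getElem ht0]
    have hnw : PySem.List.pyGetD discount ((t0 + 10 + 0 : Nat) : Int) "" = discount[t0 + 10] := by
      have e : ((t0 + 10 + 0 : Nat) : Int) = ((t0 + 10 : Nat) : Int) := by norm_num
      rw [e, PySem.List.pyGetD_natCast]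
      simp [List.getD_eq_getElem?_getD, List.getElem?_eq_getElem ht10]
    set c1 := if c.contains (discount[t0]) then c.insert (discount[t0]) (c.getD (discount[t0]) 0 - 1) else c with hc1def
    set c2 := if c1.contains (discount[t0+10]) then c1.insert (discount[t0+10]) (c1.getD (discount[t0+10]) 0 + 1) else c1 with hc2def
    have hc1con : ∀ x, c1.contains x = decide (x ∈ arr.keys) := fun x => bump_contains _ c hc _ _ x
    have hc2con : ∀ x, c2.contains x = decide (x ∈ arr.keys) := fun x => bump_contains _ c1 hc1con _ _ x
    have hc1getD : ∀ k ∈ arr.keys, c1.getD k 0 = c.getD k 0 + (if discount[t0] = k then (-1) else 0) := by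
      intro k hk
      rw [hc1def]
      have := bump_getD _ c hc (discount[t0]) (-1) k hk
      simpa [sub_eq_add_neg] using this
    have hc2getD : ∀ k ∈ arr.keys, c2.getD k 0 = (wcount discount (t0+1) k : Int) := by
      intro k hk
      rw [hc2def, bump_getD _ c1 hc1con (discount[t0+10]) 1 k hk, hc1getD k hk, hcnt k hk,
          wcount_succ discount t0 (by omega) k]
      split <;> split <;> ring
    have hmatch : (arr.keys.all (fun k => c2.getD k 0 == arr.getD k 0)) = matchN discount arr (t0+1) := by
      unfold matchN
      exact all_congr_mem _ _ _ (fun k hk => by rw [hc2getD k hk])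
    have hstep : f (c, a) ((t0 + 10 + 0 : Nat) : Int) = (c2, if matchN discount arr (t0+1) then a + 1 else a) := by
      rw [hf]
      dsimp only
      rw [hout, hnw, ← hc1def, ← hc2def, hmatch]
    have hmap : ((List.range m).map ((fun j => ((t0 + 10 + j : Nat) : Int)) ∘ Nat.succ))
        = (List.range m).map (fun j => (((t0+1) + 10 + j : Nat) : Int)) := by
      apply List.map_congr_left
      intro j _
      simp only [Function.comp]
      congr 1
      omega
    rw [hstep, hmap, ih (t0+1) c2 (if matchN discount arr (t0+1) then a + 1 else a) (by omega) hc2con hc2getD]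
    have hcnt' : (0 :: (List.range m).map Nat.succ).countP (fun j => matchN discount arr (t0 + 1 + j))
        = (if matchN discount arr (t0+1) then 1 else 0) + (List.range m).countP (fun j => matchN discount arr (t0 + 1 + 1 + j)) := by
      rw [List.countP_cons, List.countP_map]
      have e : ((fun j => matchN discount arr (t0 + 1 + j)) ∘ Nat.succ) = (fun j => matchN discount arr (t0 + 1 + 1 + j)) := by
        funext j
        simp only [Function.comp]
        congr 1
        omega
      rw [e]
      simp [Nat.add_comm]
    have hcong : (List.range m).countP (fun j => matchN discount arr (t0 + 1 + 1 + j))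
        = (List.range m).countP (fun j => matchN discount arr (t0 + 1 + (j + 1))) := by
      apply List.countP_congr
      intro j _
      have e : t0 + 1 + 1 + j = t0 + 1 + (j + 1) := by omega
      rw [e]
    rw [hcnt', hcong]
    split_ifs <;> push_cast <;> ring

theorem main_equiv (want : List String) (number : List Int) (discount : List String) :
    solution want number discount = solution_alt want number discount := by
  have hnd : (reqOf want number).keys.Nodup := reqOf_keys_nodup want number
  rw [A_eq]
  unfold solution_alt
  dsimp only
  rw [show ((want.zip number).foldl (fun d xy => d.insert xy.1 xy.2) PySem.Dict.empty)
      = reqOf want number from rfl]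
  set arr := reqOf want number with harr
  set K := arr.keys with hK
  split
  · -- the gate fails: no window can match
    rename_i hfail
    by_cases hlen : discount.length < 10
    · rw [show discount.length - 9 = 0 by omega]
      rfl
    · -- length ≥ 10, so the requirement itself is impossible
      rw [List.countP_eq_zero.mpr, Nat.cast_zero]
      intro t ht hpa
      have ht' : t < discount.length - 9 := List.mem_range.mp ht
      have hwlen : ((discount.drop t).take 10).length = 10 := by
        simp only [List.length_take, List.length_drop]
        omega
      obtain ⟨hs, hp⟩ := dictEq_gate _ arr hnd hwlen hpa
      have hvals : arr.values = K.map (fun k => arr.getD k 0) :=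
        PySem.Dict.values_eq_map_keys arr hnd 0
      rcases hfail with h | h | h
      · omega
      · exact h (by rw [hvals]; exact hs)
      · rw [List.any_eq_true] at h
        obtain ⟨v, hv, hv0⟩ := h
        rw [hvals] at hv
        obtain ⟨k, hk, rfl⟩ := List.mem_map.mp hv
        have := hp k hk
        simp at hv0
        omega
  · -- the gate holds
    rename_i hgate
    rw [not_or, not_or] at hgate
    obtain ⟨hlen10, hsumv, hanyv⟩ := hgate
    have hlen : 10 ≤ discount.length := by
      by_contra hcon
      exact absurd (by omega : (discount.length : Int) < 10) (by omega)
    have hvals : arr.values = K.map (fun k => arr.getD k 0) :=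
      PySem.Dict.values_eq_map_keys arr hnd 0
    have hsum : (K.map (fun k => arr.getD k 0)).sum = 10 := by rw [← hvals]; omega
    have hpos : ∀ k ∈ K, 0 < arr.getD k 0 := by
      intro k hk
      have hmem : arr.getD k 0 ∈ arr.values := by
        rw [hvals]; exact List.mem_map_of_mem hk
      by_contra hle
      have : arr.values.any (fun v => decide (v ≤ 0)) = true :=
        List.any_eq_true.mpr ⟨arr.getD k 0, hmem, by simp; omega⟩
      exact absurd this hanyv
    -- left side: the abstract match count
    have hL : (List.range (discount.length - 9)).countP
        (fun t => pyDictEq (PySem.Dict.counter ((discount.drop t).take 10)) arr)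
        = (List.range (discount.length - 9)).countP (matchN discount arr) := by
      apply List.countP_congr
      intro t ht
      have ht' : t < discount.length - 9 := List.mem_range.mp ht
      have hwlen : ((discount.drop t).take 10).length = 10 := by
        simp only [List.length_take, List.length_drop]
        omega
      rw [dictEq_char _ arr hnd hwlen hsum hpos]
      rfl
    rw [hL]
    -- right side: the initial fill
    have h10 : (10 : Int) = ((10 : Nat) : Int) := by norm_num
    rw [show PySem.List.slice discount none (some 10) = discount.take 10 from by
      rw [h10, PySem.List.slice_to_natCast]]
    have hcon0 : ∀ x, (K.foldl (fun d k => d.insert k 0) (PySem.Dict.empty : PySem.Dict String Int)).contains x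
        = decide (x ∈ K) := fun x => cnt0_contains K x
    obtain ⟨hcon1, hgetD1⟩ := fill_invariant K (discount.take 10) _ hcon0
    have hgetD1' : ∀ k ∈ K, ((discount.take 10).foldl
        (fun c d => if c.contains d then c.insert d (c.getD d 0 + 1) else c)
        (K.foldl (fun d k => d.insert k 0) (PySem.Dict.empty : PySem.Dict String Int))).getD k 0
        = (wcount discount 0 k : Int) := by
      intro k hk
      rw [hgetD1 k hk, cnt0_getD]
      simp [wcount]
    have hans0 : (K.all (fun k => ((discount.take 10).foldl
        (fun c d => if c.contains d then c.insert d (c.getD d 0 + 1) else c)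
        (K.foldl (fun d k => d.insert k 0) (PySem.Dict.empty : PySem.Dict String Int))).getD k 0 == arr.getD k 0))
        = matchN discount arr 0 := by
      unfold matchN
      exact all_congr_mem _ _ _ (fun k hk => by rw [hgetD1' k hk])
    rw [hans0]
    -- right side: the sliding loop
    rw [show ((discount.length : Int)) = ((10 + (discount.length - 10) : Nat) : Int) from by push_cast; omega,
        pyRange_ten (discount.length - 10),
        show (List.range (discount.length - 10)).map (fun j => ((10 + j : Nat) : Int))
          = (List.range (discount.length - 10)).map (fun j => ((0 + 10 + j : Nat) : Int)) from
          List.map_congr_left (fun j _ => by congr 1),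
        loop_invariant discount arr (discount.length - 10) 0 _ _ (by omega) hcon1 hgetD1']
    -- combine
    have hsplit : discount.length - 9 = (discount.length - 10) + 1 := by omega
    rw [hsplit, List.range_succ_eq_map, List.countP_cons, List.countP_map]
    have hcomp : ((matchN discount arr) ∘ Nat.succ) = (fun j => matchN discount arr (0 + 1 + j)) := by
      funext j
      simp only [Function.comp]
      congr 1
      omega
    rw [hcomp]
    split_ifs <;> push_cast <;> ring

-- ===== VERDICT (by name: the statement is the Claim_ definition above) =====
theorem solution_spec : Claim_equal_solution := by
  intro want number discount _
  unfold Spec_solution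
  exact main_equiv want number discount
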